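-- pv_equiv track=rewrite | github.com/clsclffk/PhoneRecommender | web_project/analysis/tasks.py | _flatten_sentences
-- ===== SOURCE A (Python) =====
-- def _flatten_sentences(queryset_sentences):
--     """TbProcessedYoutube.sentences (텍스트)를 문장 리스트로 변환"""
--     out = []
--     for text in queryset_sentences:
--         if not text:
--             continue
--         for line in (text if isinstance(text, str) else str(text)).split('\n'):
--             s = line.strip()
--             if s:
--                 out.append(s)
--     return out
-- ===== SOURCE B (Python) =====
-- def _flatten_sentences(queryset_sentences):
--     """TbProcessedYoutube.sentences -> stripped non-empty lines, via a single
--     character-level scan (state machine), with no split()/strip() calls."""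
--     out = []
--     for text in queryset_sentences:
--         if not text:
--             continue
--         s = text if isinstance(text, str) else str(text)
--         buf = []      # current line's content so far, trailing whitespace trimmed lazily
--         pending = []  # whitespace run seen since the last non-whitespace char
--         for ch in s:
--             if ch == '\n':
--                 if buf:
--                     out.append(''.join(buf))
--                 buf = []
--                 pending = []
--             elif ch.isspace():
--                 if buf:
--                     pending.append(ch)
--             else:
--                 buf.extend(pending)
--                 pending = []
--                 buf.append(ch)
--         if buf:
--             out.append(''.join(buf))
--     return out
-- ===== Notes on version B (the rewrite author's own statement) =====
-- stated objective: alternative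
-- what changed: B replaces A's split('\n')/strip()/filter pipeline by a single character-level state machine that scans each text once, flushing the current buffer on '\n', skipping leading whitespace, and buffering interior whitespace runs so trailing whitespace is trimmed lazily; no lines are ever materialised and re-stripped.
import Mathlib
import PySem

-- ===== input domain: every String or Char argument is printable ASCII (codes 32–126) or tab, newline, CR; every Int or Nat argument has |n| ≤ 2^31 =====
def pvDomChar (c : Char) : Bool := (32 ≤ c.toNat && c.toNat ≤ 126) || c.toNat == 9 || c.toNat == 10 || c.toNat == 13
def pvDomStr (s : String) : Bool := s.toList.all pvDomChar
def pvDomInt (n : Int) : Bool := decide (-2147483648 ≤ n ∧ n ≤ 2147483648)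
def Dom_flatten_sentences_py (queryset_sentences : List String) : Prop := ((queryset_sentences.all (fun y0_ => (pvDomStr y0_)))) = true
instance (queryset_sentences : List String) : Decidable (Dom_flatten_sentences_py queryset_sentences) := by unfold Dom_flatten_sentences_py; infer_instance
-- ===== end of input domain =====

-- B replaces A's split/strip/filter pipeline by a single character-level state machine
-- (flush buffer on '\n', buffer whitespace runs lazily); alternative decomposition, same cost.

-- ===== PORT A =====
def flatten_sentences_py (queryset_sentences : List String) : List String :=
  queryset_sentences.foldl (fun out text =>
    if text = "" then out     -- 'if not text: continue' (inputs are str, falsy = "")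
    else
      ((PySem.Str.split? text "\n").getD []).foldl (fun out line =>
        let s := PySem.Str.strip line
        if s = "" then out else out ++ [s]) out) []

-- ===== PORT B =====
/-- One step of Source B's inner character loop; state = (out, buf, pending). -/
def fsStep (st : List String × List Char × List Char) (ch : Char) :
    List String × List Char × List Char :=
  let out := st.1
  let buf := st.2.1
  let pending := st.2.2
  if ch = '\n' then
    ((if buf = [] then out else out ++ [String.ofList buf]), [], [])
  else if PySem.Chars.isspace ch then
    (out, buf, if buf = [] then pending else pending ++ [ch])
  else
    (out, buf ++ pending ++ [ch], [])

def flatten_sentences_py_alt (queryset_sentences : List String) : List String :=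
  queryset_sentences.foldl (fun out text =>
    if text = "" then out     -- 'if not text: continue'
    else
      let st := text.toList.foldl fsStep (out, [], [])
      if st.2.1 = [] then st.1 else st.1 ++ [String.ofList st.2.1]) []

-- ===== PRECONDITION & SPEC =====
def Spec_flatten_sentences_py (queryset_sentences : List String) (out : List String) : Prop := out = flatten_sentences_py_alt queryset_sentences
instance (queryset_sentences : List String) (out : List String) : Decidable (Spec_flatten_sentences_py queryset_sentences out) := by unfold Spec_flatten_sentences_py; infer_instance

-- ===== CLAIM (what is proved, stated in full; the proofs are below) =====
def Claim_equal_flatten_sentences_py : Prop := ∀ (queryset_sentences : List String), Dom_flatten_sentences_py queryset_sentences → Spec_flatten_sentences_py queryset_sentences (flatten_sentences_py queryset_sentences)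

-- ===== LEMMAS AND PROOFS =====

/-- Reference single-character splitter used only in the proofs. -/
def splitChar (c : Char) : List Char → List (List Char)
  | [] => [[]]
  | x :: xs =>
    let r := splitChar c xs
    if x = c then [] :: r
    else
      match r with
      | [] => [[x]]
      | h :: t => (x :: h) :: t

theorem splitChar_ne_nil (c : Char) (l : List Char) : splitChar c l ≠ [] := by
  induction l with
  | nil => simp [splitChar]
  | cons x xs ih =>
    simp only [splitChar]
    split
    · simp
    · cases h : splitChar c xs <;> simp

theorem go_eq (c : Char) : ∀ (fuel : Nat) (l cur : List Char) (acc : List (List Char)),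
    l.length < fuel →
    PySem.Chars.splitOn.go [c] fuel l cur acc
      = acc.reverse ++ (splitChar c l).modifyHead (cur.reverse ++ ·) := by
  intro fuel
  induction fuel with
  | zero => intro l cur acc h; omega
  | succ n ih =>
    intro l cur acc h
    cases l with
    | nil =>
      simp [PySem.Chars.splitOn.go, splitChar]
    | cons x rest =>
      simp only [PySem.Chars.splitOn.go, List.isPrefixOf]
      by_cases hx : c = x
      · subst hx
        simp only [BEq.rfl, Bool.true_and, if_true, List.length_cons, List.length_nil,
          List.drop_succ_cons, List.drop_zero]
        rw [ih rest [] _ (by simpa using h)]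
        simp only [splitChar, List.reverse_nil, List.nil_append,
          List.reverse_cons, List.append_assoc, List.singleton_append]
        cases splitChar c rest <;> simp
      · have hbe : (c == x) = false := by simp [hx]
        simp only [hbe, Bool.false_and, if_neg (Bool.false_ne_true)]
        rw [ih rest (x :: cur) acc (by simpa using h)]
        have hxc : ¬ (x = c) := fun hh => hx hh.symm
        simp only [splitChar, if_neg hxc]
        cases hr : splitChar c rest with
        | nil => exact absurd hr (splitChar_ne_nil c rest)
        | cons hhd ttl => simp

theorem splitOn_eq (c : Char) (s : List Char) :
    PySem.Chars.splitOn s [c] = splitChar c s := by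
  unfold PySem.Chars.splitOn
  rw [go_eq c (s.length + 1) s [] [] (by omega)]
  cases h : splitChar c s with
  | nil => exact absurd h (splitChar_ne_nil c s)
  | cons hd tl => simp

theorem split_getD (s : String) :
    (PySem.Str.split? s "\n").getD [] = (splitChar '\n' s.toList).map String.ofList := by
  simp [PySem.Str.split?, PySem.Chars.split?, show "\n".toList = ['\n'] from rfl,
        splitOn_eq]

/-- Char-level chunk filter shared by both characterizations. -/
def fchunk (x : List Char) : Option String :=
  if PySem.Chars.strip x = [] then none else some (String.ofList (PySem.Chars.strip x))

/-- Per-text result shared by both characterizations. -/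
def procText (t : String) : List String :=
  (splitChar '\n' t.toList).filterMap fchunk

theorem strip_ofList (x : List Char) :
    PySem.Str.strip (String.ofList x) = String.ofList (PySem.Chars.strip x) := by
  apply String.toList_injective
  simp [PySem.Str.toList_strip]

theorem inner_foldl (ls : List Char) (out : List String) :
    ((splitChar '\n' ls).map String.ofList).foldl (fun out line =>
        let s := PySem.Str.strip line
        if s = "" then out else out ++ [s]) out
      = out ++ (splitChar '\n' ls).filterMap fchunk := by
  induction splitChar '\n' ls generalizing out with
  | nil => simp
  | cons l ls2 ih =>
    simp only [List.map_cons, List.foldl_cons]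
    rw [ih, List.filterMap_cons]
    by_cases h : PySem.Chars.strip l = []
    · have h1 : PySem.Str.strip (String.ofList l) = "" := by
        rw [strip_ofList, h]
      simp [fchunk, h, h1]
    · have h1 : PySem.Str.strip (String.ofList l) ≠ "" := by
        rw [strip_ofList]; simp [h]
      simp [fchunk, h, strip_ofList]

theorem A_char (qs : List String) : ∀ out : List String,
    qs.foldl (fun out text =>
      if text = "" then out
      else
        ((PySem.Str.split? text "\n").getD []).foldl (fun out line =>
          let s := PySem.Str.strip line
          if s = "" then out else out ++ [s]) out) out
      = out ++ (qs.filter (fun t => decide (t ≠ ""))).flatMap procText := by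
  induction qs with
  | nil => intro out; simp
  | cons t qs ih =>
    intro out
    simp only [List.foldl_cons, List.filter_cons]
    by_cases h : t = ""
    · simp [h, ih]
    · simp only [if_neg h, h, ne_eq, not_false_eq_true, decide_true, if_true]
      rw [split_getD, inner_foldl, ih]
      simp [procText]

-- ---- B side: the state machine ----

theorem rstrip_append_ws (x : List Char) (c : Char) (h : PySem.Chars.isspace c = true) :
    PySem.Chars.rstrip (x ++ [c]) = PySem.Chars.rstrip x := by
  simp [PySem.Chars.rstrip, List.dropWhile, h]

theorem rstrip_append_nonws (x : List Char) (c : Char) (h : PySem.Chars.isspace c = false) :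
    PySem.Chars.rstrip (x ++ [c]) = x ++ [c] := by
  simp [PySem.Chars.rstrip, h]

/-- The value the scanner's buffer will hold after finishing the current chunk `h`,
given current buffer `buf` and pending whitespace `pending`. -/
def chunkVal (buf pending h : List Char) : List Char :=
  PySem.Chars.rstrip (buf ++ pending ++ (if buf = [] then PySem.Chars.lstrip h else h))

def chunkOut (buf pending h : List Char) : List String :=
  if chunkVal buf pending h = [] then [] else [String.ofList (chunkVal buf pending h)]

theorem chunkVal_nil_nil (h : List Char) :
    chunkVal [] [] h = PySem.Chars.strip h := rfl

theorem chunkOut_nil_nil (h : List Char) :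
    chunkOut [] [] h = (fchunk h).toList := by
  simp only [chunkOut, chunkVal_nil_nil, fchunk]
  by_cases hs : PySem.Chars.strip h = [] <;> simp [hs]

theorem scan_eq : ∀ (l : List Char) (out : List String) (buf pending : List Char),
    PySem.Chars.rstrip (buf ++ pending) = buf → (buf = [] → pending = []) →
    (let st := l.foldl fsStep (out, buf, pending);
     if st.2.1 = [] then st.1 else st.1 ++ [String.ofList st.2.1])
    = out ++ (match splitChar '\n' l with
       | [] => []
       | h :: t => chunkOut buf pending h ++ t.filterMap fchunk) := by
  intro l
  induction l with
  | nil =>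
    intro out buf pending hinv hbe
    have hcv : chunkVal buf pending [] = buf := by
      simp only [chunkVal]
      by_cases hb : buf = []
      · simp [hb, hbe hb, PySem.Chars.lstrip, PySem.Chars.rstrip]
      · simpa [hb] using hinv
    simp only [List.foldl_nil, splitChar, chunkOut, hcv]
    by_cases hb : buf = [] <;> simp [hb]
  | cons c rest ih =>
    intro out buf pending hinv hbe
    by_cases hc : c = '\n'
    · subst hc
      have hstep : fsStep (out, buf, pending) '\n'
          = ((if buf = [] then out else out ++ [String.ofList buf]), [], []) := rfl
      rw [List.foldl_cons, hstep,
          ih _ [] [] (by simp [PySem.Chars.rstrip]) (fun _ => rfl)]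
      have hsc : splitChar '\n' ('\n' :: rest) = [] :: splitChar '\n' rest := by
        simp [splitChar]
      rw [hsc]
      have hcv : chunkVal buf pending [] = buf := by
        simp only [chunkVal]
        by_cases hb : buf = []
        · simp [hb, hbe hb, PySem.Chars.lstrip, PySem.Chars.rstrip]
        · simpa [hb] using hinv
      have hco : (chunkOut buf pending [] : List String)
          = (if buf = [] then [] else [String.ofList buf]) := by
        simp only [chunkOut, hcv]
      cases hr : splitChar '\n' rest with
      | nil => exact absurd hr (splitChar_ne_nil _ _)
      | cons h t =>
        show ((if buf = [] then out else out ++ [String.ofList buf]) ++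
            (chunkOut [] [] h ++ t.filterMap fchunk))
          = out ++ (chunkOut buf pending [] ++ List.filterMap fchunk (h :: t))
        rw [chunkOut_nil_nil, hco, List.filterMap_cons]
        by_cases hb : buf = [] <;> cases hfc : fchunk h <;> simp [hb, hfc]
    · cases hr : splitChar '\n' rest with
      | nil => exact absurd hr (splitChar_ne_nil _ _)
      | cons h t =>
        have hsc : splitChar '\n' (c :: rest) = (c :: h) :: t := by
          simp [splitChar, hc, hr]
        by_cases hs : PySem.Chars.isspace c = true
        · -- whitespace, not newline
          have hstep : fsStep (out, buf, pending) c
              = (out, buf, if buf = [] then pending else pending ++ [c]) := by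
            simp [fsStep, hc, hs]
          rw [List.foldl_cons, hstep, hsc]
          by_cases hb : buf = []
          · rw [if_pos hb, ih _ buf pending hinv hbe, hr]
            have hv : chunkVal buf pending (c :: h) = chunkVal buf pending h := by
              have hls : PySem.Chars.lstrip (c :: h) = PySem.Chars.lstrip h := by
                simp [PySem.Chars.lstrip, List.dropWhile, hs]
              simp [chunkVal, hb, hls]
            have heq : chunkOut buf pending (c :: h) = chunkOut buf pending h := by
              simp [chunkOut, hv]
            show out ++ (chunkOut buf pending h ++ t.filterMap fchunk)
              = out ++ (chunkOut buf pending (c :: h) ++ t.filterMap fchunk)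
            rw [heq]
          · rw [if_neg hb]
            have hinv' : PySem.Chars.rstrip (buf ++ (pending ++ [c])) = buf := by
              rw [← List.append_assoc, rstrip_append_ws _ _ hs, hinv]
            rw [ih _ buf (pending ++ [c]) hinv' (fun hh => absurd hh hb), hr]
            have hv : chunkVal buf pending (c :: h) = chunkVal buf (pending ++ [c]) h := by
              have hl : buf ++ pending ++ c :: h = buf ++ (pending ++ [c]) ++ h := by simp
              simp only [chunkVal, if_neg hb, hl]
            have heq : chunkOut buf pending (c :: h) = chunkOut buf (pending ++ [c]) h := by
              simp [chunkOut, hv]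
            show out ++ (chunkOut buf (pending ++ [c]) h ++ t.filterMap fchunk)
              = out ++ (chunkOut buf pending (c :: h) ++ t.filterMap fchunk)
            rw [heq]
        · -- regular char
          have hs' : PySem.Chars.isspace c = false := by simpa using hs
          have hstep : fsStep (out, buf, pending) c
              = (out, buf ++ pending ++ [c], []) := by
            simp [fsStep, hc, hs']
          have hne : buf ++ pending ++ [c] ≠ [] := by simp
          have hinv' : PySem.Chars.rstrip ((buf ++ pending ++ [c]) ++ []) = buf ++ pending ++ [c] := by
            rw [List.append_nil, rstrip_append_nonws _ _ hs']
          rw [List.foldl_cons, hstep,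
              ih _ (buf ++ pending ++ [c]) [] hinv' (fun hh => absurd hh hne), hsc, hr]
          have hv : chunkVal buf pending (c :: h) = chunkVal (buf ++ pending ++ [c]) [] h := by
            have hls : (if buf = [] then PySem.Chars.lstrip (c :: h) else c :: h) = c :: h := by
              have : PySem.Chars.lstrip (c :: h) = c :: h := by
                simp [PySem.Chars.lstrip, List.dropWhile, hs']
              split <;> simp [this]
            have hl : buf ++ pending ++ c :: h = (buf ++ pending ++ [c]) ++ ([] ++ h) := by simp
            rw [chunkVal, chunkVal, if_neg hne, hls, hl]
            simp
          have heq : chunkOut buf pending (c :: h) = chunkOut (buf ++ pending ++ [c]) [] h := by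
            simp [chunkOut, hv]
          show out ++ (chunkOut (buf ++ pending ++ [c]) [] h ++ t.filterMap fchunk)
            = out ++ (chunkOut buf pending (c :: h) ++ t.filterMap fchunk)
          rw [heq]

theorem B_char (qs : List String) : ∀ out : List String,
    qs.foldl (fun out text =>
      if text = "" then out
      else
        let st := text.toList.foldl fsStep (out, [], [])
        if st.2.1 = [] then st.1 else st.1 ++ [String.ofList st.2.1]) out
      = out ++ (qs.filter (fun t => decide (t ≠ ""))).flatMap procText := by
  induction qs with
  | nil => intro out; simp
  | cons t qs ih =>
    intro out
    simp only [List.foldl_cons, List.filter_cons]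
    by_cases h : t = ""
    · simp [h, ih]
    · simp only [if_neg h, h, ne_eq, not_false_eq_true, decide_true, if_true]
      rw [ih]
      have := scan_eq t.toList out [] [] (by simp [PySem.Chars.rstrip]) (fun _ => rfl)
      simp only at this
      rw [this]
      cases hr : splitChar '\n' t.toList with
      | nil => exact absurd hr (splitChar_ne_nil _ _)
      | cons hh tt =>
        have := chunkOut_nil_nil hh
        simp only [procText, hr, List.filterMap_cons, List.flatMap_cons]
        cases hfc : fchunk hh <;> simp_all [List.append_assoc]

theorem flatten_sentences_py_eq_alt (qs : List String) :
    flatten_sentences_py qs = flatten_sentences_py_alt qs := by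
  simp only [flatten_sentences_py, flatten_sentences_py_alt]
  rw [A_char qs [], B_char qs []]

-- ===== VERDICT (by name: the statement is the Claim_ definition above) =====
theorem flatten_sentences_py_spec : Claim_equal_flatten_sentences_py := by
  intro qs _
  unfold Spec_flatten_sentences_py
  exact flatten_sentences_py_eq_alt qs
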